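-- pv_equiv track=rewrite | github.com/EDDxample/advent-of-code-framework | aoc/2021/09/solution.py | part2
-- ===== SOURCE A (Python) =====
-- from itertools import product
--
-- def part2(s: str, ex: str):
--     # s = ex # example mode
--     heightmap = [[int(n) for n in line] for line in s.splitlines()]
--     width, height = len(heightmap[0]), len(heightmap)
--
--     basin_centers = []
--     basin_sums = []
--     count = 0
--
--     def bfs(x, y):
--         visited.add((x, y))
--         count = 0
--         n = heightmap[y][x]
--         def is_higher(i, j): return heightmap[j][i] != 9 and (i, j) not in visited and n < heightmap[j][i]
--
--         if x != 0 and is_higher(x - 1, y):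
--             count += bfs(x - 1, y)
--         if x != width - 1 and is_higher(x + 1, y):
--             count += bfs(x + 1, y)
--         if y != 0 and is_higher(x, y - 1):
--             count += bfs(x, y - 1)
--         if y != height - 1 and is_higher(x, y + 1):
--             count += bfs(x, y + 1)
--         return count + 1
--
--     for x, y in product(range(width), range(height)):
--         is_low = True
--         value = heightmap[y][x]
--         if x != 0 and heightmap[y][x - 1] <= value:
--             is_low = False
--         elif x != width - 1 and heightmap[y][x + 1] <= value:
--             is_low = False
--         elif y != 0 and heightmap[y - 1][x] <= value:
--             is_low = False
--         elif y != height - 1 and heightmap[y + 1][x] <= value: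
--             is_low = False
--
--         if is_low:
--             basin_centers.append((x, y))
--
--     for x, y in basin_centers:
--         visited = set()
--         basin_sums.append(bfs(x, y))
--
--     result = 1
--     for n in sorted(basin_sums)[-3:]:
--         result *= n
--
--     return result
-- ===== SOURCE B (Python) =====
-- def part2(s: str, ex: str):
--     grid = [[int(c) for c in line] for line in s.splitlines()]
--     height = len(grid)
--     width = len(grid[0])
--
--     def nbrs(x, y):
--         out = []
--         if x > 0: out.append((x - 1, y))
--         if x < width - 1: out.append((x + 1, y))
--         if y > 0: out.append((x, y - 1))
--         if y < height - 1: out.append((x, y + 1))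
--         return out
--
--     sizes = []
--     for x in range(width):
--         for y in range(height):
--             v = grid[y][x]
--             if all(grid[j][i] > v for (i, j) in nbrs(x, y)):
--                 # iterative flood fill from the low point
--                 visited = {(x, y)}
--                 stack = [(x, y)]
--                 while stack:
--                     cx, cy = stack.pop()
--                     cv = grid[cy][cx]
--                     for (i, j) in nbrs(cx, cy):
--                         if grid[j][i] != 9 and (i, j) not in visited and cv < grid[j][i]:
--                             visited.add((i, j))
--                             stack.append((i, j))
--                 sizes.append(len(visited))
--
--     result = 1
--     for n in sorted(sizes)[-3:]:
--         result *= n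
--     return result
-- ===== Notes on version B (the rewrite author's own statement) =====
-- stated objective: alternative
-- what changed: A's recursive depth-first basin search (nested bfs closure mutating a shared visited set, basin size returned as a recursion count) is replaced by an iterative explicit-stack flood fill fused into the low-point scan, with the basin size read off as len(visited); the low-point elif chain becomes an all() over a neighbour list.
import Mathlib
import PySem

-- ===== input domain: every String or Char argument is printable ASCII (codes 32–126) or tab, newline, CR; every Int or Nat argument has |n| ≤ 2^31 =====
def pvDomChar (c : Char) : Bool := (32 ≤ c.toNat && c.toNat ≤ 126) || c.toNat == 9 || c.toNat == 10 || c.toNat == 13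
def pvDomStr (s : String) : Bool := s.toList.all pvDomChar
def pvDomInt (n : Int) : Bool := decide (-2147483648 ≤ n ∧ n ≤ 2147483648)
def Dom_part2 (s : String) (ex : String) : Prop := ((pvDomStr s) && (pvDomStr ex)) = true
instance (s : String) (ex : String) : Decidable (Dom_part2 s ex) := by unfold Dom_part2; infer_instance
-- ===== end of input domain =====

-- B replaces A's recursive depth-first basin search (nested `bfs` with a shared mutable
-- visited set) by an iterative explicit-stack flood fill fused into the low-point scan;
-- the low-point test becomes an `all(...)` over a neighbour list. Same return value.

-- shared parsing/indexing helpers (both Pythons parse and index the grid identically)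
def pvParse (s : String) : List (List Int) :=
  (PySem.Str.splitlines s).map (fun line => line.toList.map (fun c => (PySem.Int.ofChars? [c]).getD 0))

def pvVal (hm : List (List Int)) (x y : Int) : Int :=
  (PySem.List.pyGet? ((PySem.List.pyGet? hm y).getD []) x).getD 0

-- ===== PORT A =====
-- `is_low` loop body of A's first loop (the elif chain), as a Bool
def pvIsLowA (hm : List (List Int)) (w h x y : Int) : Bool :=
  let v := pvVal hm x y
  if x ≠ 0 ∧ pvVal hm (x-1) y ≤ v then false
  else if x ≠ w - 1 ∧ pvVal hm (x+1) y ≤ v then false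
  else if y ≠ 0 ∧ pvVal hm x (y-1) ≤ v then false
  else if y ≠ h - 1 ∧ pvVal hm x (y+1) ≤ v then false
  else true

-- `is_higher` of A
def pvHigher (hm : List (List Int)) (n : Int) (vis : PySem.Set (Int × Int)) (i j : Int) : Bool :=
  (pvVal hm i j != 9) && !(PySem.Set.contains vis (i, j)) && decide (n < pvVal hm i j)

-- A's recursive `bfs`; the Nat fuel only makes the recursion total (it is proved unreachable)
def pvBfsA (hm : List (List Int)) (w h : Int) : Nat → Int → Int → PySem.Set (Int × Int) → Int × PySem.Set (Int × Int)
  | 0, _, _, vis => (0, vis)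
  | fuel+1, x, y, vis =>
    let vis := PySem.Set.add vis (x, y)
    let n := pvVal hm x y
    let s1 := if (x != 0) && pvHigher hm n vis (x-1) y then
                let r := pvBfsA hm w h fuel (x-1) y vis; ((0 : Int) + r.1, r.2)
              else (0, vis)
    let s2 := if (x != w - 1) && pvHigher hm n s1.2 (x+1) y then
                let r := pvBfsA hm w h fuel (x+1) y s1.2; (s1.1 + r.1, r.2)
              else s1
    let s3 := if (y != 0) && pvHigher hm n s2.2 x (y-1) then
                let r := pvBfsA hm w h fuel x (y-1) s2.2; (s2.1 + r.1, r.2)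
              else s2
    let s4 := if (y != h - 1) && pvHigher hm n s3.2 x (y+1) then
                let r := pvBfsA hm w h fuel x (y+1) s3.2; (s3.1 + r.1, r.2)
              else s3
    (s4.1 + 1, s4.2)

def part2 (s : String) (ex : String) : Int :=
  let heightmap := pvParse s
  let width : Int := ((heightmap.headD []).length : Int)
  let height : Int := (heightmap.length : Int)
  let basin_centers : List (Int × Int) :=
    (PySem.List.pyRange 0 width 1).foldl (fun acc x =>
      (PySem.List.pyRange 0 height 1).foldl (fun acc y =>
        if pvIsLowA heightmap width height x y then acc ++ [(x, y)] else acc) acc) []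
  let basin_sums : List Int :=
    basin_centers.foldl (fun acc p =>
      acc ++ [(pvBfsA heightmap width height ((width * height).toNat + 1) p.1 p.2 PySem.Set.empty).1]) []
  (PySem.List.slice (PySem.List.sorted basin_sums (fun n => n) false) (some (-3)) none).foldl (fun r n => r * n) 1

-- ===== PORT B =====
-- B's `nbrs(x, y)`
def pvNbrs (w h x y : Int) : List (Int × Int) :=
  ((if x > 0 then [(x-1, y)] else []) ++ (if x < w - 1 then [(x+1, y)] else [])) ++
  ((if y > 0 then [(x, y-1)] else []) ++ (if y < h - 1 then [(x, y+1)] else []))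

-- B's low-point test: all neighbours strictly higher
def pvIsLowB (hm : List (List Int)) (w h x y : Int) : Bool :=
  (pvNbrs w h x y).all (fun q => decide (pvVal hm x y < pvVal hm q.1 q.2))

-- B's while loop: pop a cell, push every eligible neighbour; fuel only for totality
def pvFlood (hm : List (List Int)) (w h : Int) : Nat → List (Int × Int) → PySem.Set (Int × Int) → PySem.Set (Int × Int)
  | 0, _, vis => vis
  | _+1, [], vis => vis
  | fuel+1, p :: st, vis =>
    let cv := pvVal hm p.1 p.2
    let next := (pvNbrs w h p.1 p.2).foldl (fun (acc : PySem.Set (Int × Int) × List (Int × Int)) q =>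
        if (pvVal hm q.1 q.2 != 9) && !(PySem.Set.contains acc.1 q) && decide (cv < pvVal hm q.1 q.2) then
          (PySem.Set.add acc.1 q, q :: acc.2)
        else acc) (vis, st)
    pvFlood hm w h fuel next.2 next.1

def part2_alt (s : String) (ex : String) : Int :=
  let grid := pvParse s
  let height : Int := (grid.length : Int)
  let width : Int := ((grid.headD []).length : Int)
  let sizes : List Int :=
    (PySem.List.pyRange 0 width 1).foldl (fun acc x =>
      (PySem.List.pyRange 0 height 1).foldl (fun acc y =>
        if pvIsLowB grid width height x y then
          acc ++ [((pvFlood grid width height ((width * height).toNat + 1) [(x, y)] (PySem.Set.ofList [(x, y)])).length : Int)]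
        else acc) acc) []
  (PySem.List.slice (PySem.List.sorted sizes (fun n => n) false) (some (-3)) none).foldl (fun r n => r * n) 1

-- ===== PRECONDITION & SPEC =====
-- Pre_ excludes exactly the inputs where A raises: an input with no lines (heightmap[0] →
-- IndexError), a non-digit grid character (int(c) → ValueError), or a row shorter than the
-- first row (IndexError during the scan).
def Pre_part2 (s : String) (ex : String) : Prop :=
  (let lines := PySem.Chars.splitlines s.toList
   !lines.isEmpty && lines.all (fun l => l.all PySem.Chars.isdigit &&
     decide ((lines.headD []).length ≤ l.length))) = true
instance (s : String) (ex : String) : Decidable (Pre_part2 s ex) := by unfold Pre_part2; infer_instance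

def pvWitness_part2 : String × String := ("21\n39", "")

def Spec_part2 (s : String) (ex : String) (out : Int) : Prop := out = part2_alt s ex
instance (s : String) (ex : String) (out : Int) : Decidable (Spec_part2 s ex out) := by unfold Spec_part2; infer_instance

-- ===== CLAIM (what is proved, stated in full; the proofs are below) =====
def Claim_equal_part2 : Prop := ∀ (s : String) (ex : String), Dom_part2 s ex → Pre_part2 s ex → Spec_part2 s ex (part2 s ex)

-- ===== LEMMAS AND PROOFS =====


-- ===== proof framework: both flood fills compute the set of cells reachable from the
-- ===== basin centre along strictly-increasing, non-9 neighbour steps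

def pvInb (w h : Int) (p : Int × Int) : Prop :=
  0 ≤ p.1 ∧ p.1 < w ∧ 0 ≤ p.2 ∧ p.2 < h

def pvStep (hm : List (List Int)) (w h : Int) (p q : Int × Int) : Prop :=
  q ∈ pvNbrs w h p.1 p.2 ∧ pvVal hm q.1 q.2 ≠ 9 ∧ pvVal hm p.1 p.2 < pvVal hm q.1 q.2

inductive pvReach (hm : List (List Int)) (w h : Int) (s : Int × Int) : Int × Int → Prop
  | base : pvReach hm w h s s
  | tail {p q : Int × Int} : pvReach hm w h s p → pvStep hm w h p q → pvReach hm w h s q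

lemma pvNbrs_inb {w h x y : Int} (hin : pvInb w h (x, y)) {q : Int × Int}
    (hq : q ∈ pvNbrs w h x y) : pvInb w h q := by
  obtain ⟨h1, h2, h3, h4⟩ := hin
  simp only [pvNbrs, List.mem_append] at hq
  rcases hq with (hq | hq) | (hq | hq) <;>
    [skip; skip; skip; skip] <;>
    · split_ifs at hq <;> simp_all [pvInb] <;> omega

lemma mem_pvNbrs_iff {w h x y : Int} (hin : pvInb w h (x, y)) (q : Int × Int) :
    q ∈ pvNbrs w h x y ↔
      ((x ≠ 0 ∧ q = (x-1, y)) ∨ (x ≠ w - 1 ∧ q = (x+1, y)) ∨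
       (y ≠ 0 ∧ q = (x, y-1)) ∨ (y ≠ h - 1 ∧ q = (x, y+1))) := by
  obtain ⟨h1, h2, h3, h4⟩ := hin
  simp only [pvNbrs, List.mem_append]
  constructor
  · rintro ((hq | hq) | (hq | hq)) <;> split_ifs at hq <;> simp_all <;> omega
  · rintro (⟨hx, rfl⟩ | ⟨hx, rfl⟩ | ⟨hy, rfl⟩ | ⟨hy, rfl⟩) <;> split_ifs <;> simp_all <;> omega

-- a nodup list of in-bounds cells has at most w*h elements
lemma pvLen_le {w h : Int} (V : List (Int × Int)) (hnd : V.Nodup)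
    (hinb : ∀ p ∈ V, pvInb w h p) : V.length ≤ w.toNat * h.toNat := by
  classical
  have hsub : V.toFinset ⊆ (Finset.range w.toNat ×ˢ Finset.range h.toNat).image
      (fun ab : ℕ × ℕ => ((ab.1 : Int), (ab.2 : Int))) := by
    intro p hp
    obtain ⟨p1, p2⟩ := p
    rw [List.mem_toFinset] at hp
    obtain ⟨ha, hb, hc, hd⟩ := hinb _ hp
    simp only [Finset.mem_image, Finset.mem_product, Finset.mem_range]
    exact ⟨(p1.toNat, p2.toNat), ⟨by omega, by omega⟩, by simp only [Prod.mk.injEq]; constructor <;> omega⟩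
  calc V.length = V.toFinset.card := (List.toFinset_card_of_nodup hnd).symm
    _ ≤ _ := Finset.card_le_card hsub
    _ ≤ (Finset.range w.toNat ×ˢ Finset.range h.toNat).card := Finset.card_image_le
    _ = w.toNat * h.toNat := by simp [Finset.card_product]

structure PvInv (hm : List (List Int)) (w h : Int) (s : Int × Int) (V : List (Int × Int)) : Prop where
  nodup : V.Nodup
  reach : ∀ p ∈ V, pvReach hm w h s p
  inb : ∀ p ∈ V, pvInb w h p

lemma set_add_not_mem {α : Type} [BEq α] [LawfulBEq α] (s : PySem.Set α) (x : α) (hx : x ∉ s) :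
    PySem.Set.add s x = s ++ [x] := by
  simp [PySem.Set.add, PySem.Set.contains_eq_listContains]
  intro h; exact absurd h hx

def BfsPost (hm : List (List Int)) (w h : Int) (s xy : Int × Int) (V : List (Int × Int))
    (out : Int × List (Int × Int)) : Prop :=
  (∃ L, out.2 = V ++ L) ∧ PvInv hm w h s out.2 ∧ xy ∈ out.2 ∧
  out.1 = (out.2.length : Int) - V.length ∧
  (∀ p ∈ out.2, p ∉ V → ∀ r, pvStep hm w h p r → r ∈ out.2)

def SlotPost (hm : List (List Int)) (w h : Int) (s xy q : Int × Int) (c : Int)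
    (V : List (Int × Int)) (out : Int × List (Int × Int)) : Prop :=
  (∃ L, out.2 = V ++ L) ∧ PvInv hm w h s out.2 ∧
  out.1 = c + ((out.2.length : Int) - V.length) ∧
  (∀ p ∈ out.2, p ∉ V → ∀ r, pvStep hm w h p r → r ∈ out.2) ∧
  (pvStep hm w h xy q → q ∈ out.2)

lemma slot_post (hm : List (List Int)) (w h : Int) (s : Int × Int) (fuel : Nat)
    (x y i j : Int) (b : Bool) (c : Int) (V : List (Int × Int)) (out : Int × List (Int × Int))
    (IH : ∀ x' y' (V' : List (Int × Int)), pvInb w h (x', y') → pvReach hm w h s (x', y') →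
      (x', y') ∉ V' → PvInv hm w h s V' → w.toNat * h.toNat < V'.length + fuel →
      BfsPost hm w h s (x', y') V' (pvBfsA hm w h fuel x' y' V'))
    (hin : pvInb w h (x, y)) (hR : pvReach hm w h s (x, y))
    (hb : b = true ↔ (i, j) ∈ pvNbrs w h x y)
    (hV : PvInv hm w h s V)
    (hfuel : w.toNat * h.toNat < V.length + fuel)
    (hout : out = if b && pvHigher hm (pvVal hm x y) V i j then
        (c + (pvBfsA hm w h fuel i j V).1, (pvBfsA hm w h fuel i j V).2) else (c, V)) :
    SlotPost hm w h s (x, y) (i, j) c V out := by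
  by_cases hg : (b && pvHigher hm (pvVal hm x y) V i j) = true
  · simp only [hg, if_true] at hout
    rw [Bool.and_eq_true] at hg
    obtain ⟨hb', hhi⟩ := hg
    simp only [pvHigher, Bool.and_eq_true, bne_iff_ne, Bool.not_eq_true',
      PySem.Set.contains_eq_listContains, decide_eq_true_eq] at hhi
    obtain ⟨⟨hne9, hnm⟩, hlt⟩ := hhi
    rw [List.contains_eq_mem, decide_eq_false_iff_not] at hnm
    have hstep : pvStep hm w h (x, y) (i, j) := ⟨hb.mp hb', hne9, hlt⟩
    have hpost := IH i j V (pvNbrs_inb hin hstep.1) (hR.tail hstep) hnm hV hfuel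
    obtain ⟨hext, hinv, hmem, hcount, hclosed⟩ := hpost
    subst hout
    refine ⟨hext, hinv, ?_, hclosed, fun _ => hmem⟩
    dsimp only
    rw [hcount]
  · rw [Bool.not_eq_true] at hg
    simp only [hg, Bool.false_eq_true, if_false] at hout
    subst hout
    refine ⟨⟨[], by simp⟩, hV, by simp, by intro p hp hnp; exact absurd hp hnp, ?_⟩
    intro hstep
    have hb' := hb.mpr hstep.1
    rw [hb', Bool.true_and] at hg
    by_contra hnm
    simp [pvHigher, PySem.Set.contains_eq_listContains, List.contains_eq_mem,
      hstep.2.1, hstep.2.2, hnm] at hg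

-- one neighbour check of A's bfs frame, as a state transformer
def pvSlot (hm : List (List Int)) (w h : Int) (fuel : Nat) (x y i j : Int) (b : Bool)
    (st : Int × List (Int × Int)) : Int × List (Int × Int) :=
  if b && pvHigher hm (pvVal hm x y) st.2 i j then
    (st.1 + (pvBfsA hm w h fuel i j st.2).1, (pvBfsA hm w h fuel i j st.2).2)
  else st

lemma pvBfsA_succ (hm : List (List Int)) (w h : Int) (fuel : Nat) (x y : Int)
    (vis : PySem.Set (Int × Int)) :
    pvBfsA hm w h (fuel+1) x y vis =
      (let s4 := pvSlot hm w h fuel x y x (y+1) (y != h - 1)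
        (pvSlot hm w h fuel x y x (y-1) (y != 0)
          (pvSlot hm w h fuel x y (x+1) y (x != w - 1)
            (pvSlot hm w h fuel x y (x-1) y (x != 0) ((0 : Int), PySem.Set.add vis (x, y)))))
       (s4.1 + 1, s4.2)) := rfl

lemma slot_post' (hm : List (List Int)) (w h : Int) (s : Int × Int) (fuel : Nat)
    (x y i j : Int) (b : Bool) (st : Int × List (Int × Int))
    (IH : ∀ x' y' (V' : List (Int × Int)), pvInb w h (x', y') → pvReach hm w h s (x', y') →
      (x', y') ∉ V' → PvInv hm w h s V' → w.toNat * h.toNat < V'.length + fuel →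
      BfsPost hm w h s (x', y') V' (pvBfsA hm w h fuel x' y' V'))
    (hin : pvInb w h (x, y)) (hR : pvReach hm w h s (x, y))
    (hb : b = true ↔ (i, j) ∈ pvNbrs w h x y)
    (hV : PvInv hm w h s st.2)
    (hfuel : w.toNat * h.toNat < st.2.length + fuel) :
    SlotPost hm w h s (x, y) (i, j) st.1 st.2 (pvSlot hm w h fuel x y i j b st) :=
  slot_post hm w h s fuel x y i j b st.1 st.2 _ IH hin hR hb hV hfuel rfl

lemma ext_mono {α : Type} {a b : List α} (h : ∃ L, b = a ++ L) : ∀ p ∈ a, p ∈ b := by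
  obtain ⟨L, rfl⟩ := h; exact fun p hp => List.mem_append_left _ hp

lemma bfsA_post (hm : List (List Int)) (w h : Int) (s : Int × Int) :
    ∀ (fuel : Nat) (x y : Int) (V : List (Int × Int)),
    pvInb w h (x, y) → pvReach hm w h s (x, y) → (x, y) ∉ V → PvInv hm w h s V →
    w.toNat * h.toNat < V.length + fuel →
    BfsPost hm w h s (x, y) V (pvBfsA hm w h fuel x y V) := by
  intro fuel
  induction fuel with
  | zero =>
    intro x y V hin hR hnv hV hfuel
    exfalso
    have hnd : (V ++ [(x, y)]).Nodup :=
      hV.nodup.append (List.nodup_singleton _) (by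
        intro a ha hb
        simp only [List.mem_singleton] at hb
        subst hb; exact hnv ha)
    have hinb : ∀ p ∈ V ++ [(x, y)], pvInb w h p := by
      intro p hp
      rcases List.mem_append.mp hp with hp | hp
      · exact hV.inb p hp
      · simp only [List.mem_singleton] at hp; subst hp; exact hin
    have := pvLen_le (w := w) (h := h) _ hnd hinb
    simp only [List.length_append, List.length_singleton] at this
    omega
  | succ fuel IH =>
    intro x y V hin hR hnv hV hfuel
    have hadd : PySem.Set.add V (x, y) = V ++ [(x, y)] := set_add_not_mem _ _ hnv
    rw [pvBfsA_succ, hadd]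
    dsimp only
    -- invariants for V₁ = V ++ [(x,y)]
    have hV1 : PvInv hm w h s (V ++ [(x, y)]) := by
      refine ⟨hV.nodup.append (List.nodup_singleton _) ?_, ?_, ?_⟩
      · intro a ha hb
        simp only [List.mem_singleton] at hb
        subst hb; exact hnv ha
      · intro p hp
        rcases List.mem_append.mp hp with hp | hp
        · exact hV.reach p hp
        · simp only [List.mem_singleton] at hp; subst hp; exact hR
      · intro p hp
        rcases List.mem_append.mp hp with hp | hp
        · exact hV.inb p hp
        · simp only [List.mem_singleton] at hp; subst hp; exact hin
    have hfuel1 : w.toNat * h.toNat < (V ++ [(x, y)]).length + fuel := by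
      simp only [List.length_append, List.length_singleton]; omega
    obtain ⟨hxl, hxw, hyl, hyh⟩ := hin
    have hb1 : ((x != 0) = true) ↔ (x - 1, y) ∈ pvNbrs w h x y := by
      rw [mem_pvNbrs_iff ⟨hxl, hxw, hyl, hyh⟩]
      simp only [bne_iff_ne, ne_eq, Prod.mk.injEq, and_true]
      omega
    have hb2 : ((x != w - 1) = true) ↔ (x + 1, y) ∈ pvNbrs w h x y := by
      rw [mem_pvNbrs_iff ⟨hxl, hxw, hyl, hyh⟩]
      simp only [bne_iff_ne, ne_eq, Prod.mk.injEq, and_true]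
      omega
    have hb3 : ((y != 0) = true) ↔ (x, y - 1) ∈ pvNbrs w h x y := by
      rw [mem_pvNbrs_iff ⟨hxl, hxw, hyl, hyh⟩]
      simp only [bne_iff_ne, ne_eq, Prod.mk.injEq, and_true]
      omega
    have hb4 : ((y != h - 1) = true) ↔ (x, y + 1) ∈ pvNbrs w h x y := by
      rw [mem_pvNbrs_iff ⟨hxl, hxw, hyl, hyh⟩]
      simp only [bne_iff_ne, ne_eq, Prod.mk.injEq, and_true]
      omega
    set s0 : Int × List (Int × Int) := ((0 : Int), V ++ [(x, y)]) with hs0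
    have P1 := slot_post' hm w h s fuel x y (x-1) y (x != 0) s0 IH ⟨hxl, hxw, hyl, hyh⟩ hR hb1 hV1 hfuel1
    set s1 := pvSlot hm w h fuel x y (x-1) y (x != 0) s0 with hs1
    obtain ⟨⟨L1, hL1⟩, hinv1, hc1, hcl1, hm1⟩ := P1
    have hfuel2 : w.toNat * h.toNat < s1.2.length + fuel := by
      rw [hL1]; simp only [hs0, List.length_append, List.length_singleton]; omega
    have P2 := slot_post' hm w h s fuel x y (x+1) y (x != w - 1) s1 IH ⟨hxl, hxw, hyl, hyh⟩ hR hb2 hinv1 hfuel2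
    set s2 := pvSlot hm w h fuel x y (x+1) y (x != w - 1) s1 with hs2
    obtain ⟨⟨L2, hL2⟩, hinv2, hc2, hcl2, hm2⟩ := P2
    have hfuel3 : w.toNat * h.toNat < s2.2.length + fuel := by
      rw [hL2, hL1]; simp only [hs0, List.length_append, List.length_singleton]; omega
    have P3 := slot_post' hm w h s fuel x y x (y-1) (y != 0) s2 IH ⟨hxl, hxw, hyl, hyh⟩ hR hb3 hinv2 hfuel3
    set s3 := pvSlot hm w h fuel x y x (y-1) (y != 0) s2 with hs3
    obtain ⟨⟨L3, hL3⟩, hinv3, hc3, hcl3, hm3⟩ := P3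
    have hfuel4 : w.toNat * h.toNat < s3.2.length + fuel := by
      rw [hL3, hL2, hL1]; simp only [hs0, List.length_append, List.length_singleton]; omega
    have P4 := slot_post' hm w h s fuel x y x (y+1) (y != h - 1) s3 IH ⟨hxl, hxw, hyl, hyh⟩ hR hb4 hinv3 hfuel4
    set s4 := pvSlot hm w h fuel x y x (y+1) (y != h - 1) s3 with hs4
    obtain ⟨⟨L4, hL4⟩, hinv4, hc4, hcl4, hm4⟩ := P4
    have hmono1 : ∀ p ∈ s1.2, p ∈ s4.2 := by
      intro p hp
      exact ext_mono ⟨L4, hL4⟩ _ (ext_mono ⟨L3, hL3⟩ _ (ext_mono ⟨L2, hL2⟩ _ hp))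
    have hmono2 : ∀ p ∈ s2.2, p ∈ s4.2 := fun p hp =>
      ext_mono ⟨L4, hL4⟩ _ (ext_mono ⟨L3, hL3⟩ _ hp)
    have hmono3 : ∀ p ∈ s3.2, p ∈ s4.2 := fun p hp => ext_mono ⟨L4, hL4⟩ _ hp
    have hxyV1 : (x, y) ∈ s0.2 := by simp [hs0]
    have hxy4 : (x, y) ∈ s4.2 := hmono1 _ (ext_mono ⟨L1, hL1⟩ _ hxyV1)
    refine ⟨⟨[(x, y)] ++ L1 ++ L2 ++ L3 ++ L4, ?_⟩, hinv4, hxy4, ?_, ?_⟩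
    · rw [hL4, hL3, hL2, hL1]
      simp [hs0, List.append_assoc]
    · -- count
      have e1 : s1.2.length = s0.2.length + L1.length := by rw [hL1]; simp
      have e2 : s2.2.length = s1.2.length + L2.length := by rw [hL2]; simp
      have e3 : s3.2.length = s2.2.length + L3.length := by rw [hL3]; simp
      have e4 : s4.2.length = s3.2.length + L4.length := by rw [hL4]; simp
      have e0 : s0.2.length = V.length + 1 := by simp [hs0]
      have hc0 : s0.1 = 0 := rfl
      dsimp only
      rw [hc4, hc3, hc2, hc1, hc0]
      push_cast [e1, e2, e3, e4, e0]
      ring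
    · -- closedness
      intro p hp hpV r hstep
      by_cases hp1 : p ∈ s0.2
      · -- p = (x,y)
        have hpxy : p = (x, y) := by
          simp only [hs0, List.mem_append, List.mem_singleton] at hp1
          rcases hp1 with hp1 | hp1
          · exact absurd hp1 hpV
          · exact hp1
        subst hpxy
        have hr := (mem_pvNbrs_iff ⟨hxl, hxw, hyl, hyh⟩ r).mp hstep.1
        rcases hr with ⟨_, rfl⟩ | ⟨_, rfl⟩ | ⟨_, rfl⟩ | ⟨_, rfl⟩
        · exact hmono1 _ (hm1 hstep)
        · exact hmono2 _ (hm2 hstep)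
        · exact hmono3 _ (hm3 hstep)
        · exact hm4 hstep
      · by_cases hp2 : p ∈ s1.2
        · exact hmono1 _ (hcl1 p hp2 hp1 r hstep)
        · by_cases hp3 : p ∈ s2.2
          · exact hmono2 _ (hcl2 p hp3 hp2 r hstep)
          · by_cases hp4 : p ∈ s3.2
            · exact hmono3 _ (hcl3 p hp4 hp3 r hstep)
            · exact hcl4 p hp hp4 r hstep

lemma bfsA_top (hm : List (List Int)) (w h x y : Int) (hin : pvInb w h (x, y)) :
    (pvBfsA hm w h ((w * h).toNat + 1) x y PySem.Set.empty).1 =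
      ((pvBfsA hm w h ((w * h).toNat + 1) x y PySem.Set.empty).2.length : Int) ∧
    (pvBfsA hm w h ((w * h).toNat + 1) x y PySem.Set.empty).2.Nodup ∧
    (∀ p, p ∈ (pvBfsA hm w h ((w * h).toNat + 1) x y PySem.Set.empty).2 ↔ pvReach hm w h (x, y) p) := by
  have hN : w.toNat * h.toNat = (w * h).toNat := by
    obtain ⟨hxl, hxw, hyl, hyh⟩ := hin
    dsimp only at hxl hxw hyl hyh
    rw [Int.toNat_mul (by omega) (by omega)]
  have hpost := bfsA_post hm w h (x, y) ((w * h).toNat + 1) x y []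
    hin .base (by simp) ⟨List.nodup_nil, by simp, by simp⟩ (by simp [hN])
  obtain ⟨⟨L, hL⟩, hinv, hmem, hcount, hclosed⟩ := hpost
  refine ⟨by simpa using hcount, hinv.nodup, fun p => ⟨fun hp => hinv.reach p hp, fun hp => ?_⟩⟩
  induction hp with
  | base => exact hmem
  | tail hr hstep ih => exact hclosed _ ih (by simp) _ hstep

-- ===== B side: the stack flood fill computes the same reachable set =====

lemma floodFold_post (hm : List (List Int)) (w h : Int) (s p : Int × Int)
    (hpin : pvInb w h p) (hpR : pvReach hm w h s p) :
    ∀ (ns : List (Int × Int)), (∀ q ∈ ns, q ∈ pvNbrs w h p.1 p.2) →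
    ∀ (vis : PySem.Set (Int × Int)) (st : List (Int × Int)), PvInv hm w h s vis →
    ∃ L, (ns.foldl (fun (acc : PySem.Set (Int × Int) × List (Int × Int)) q =>
        if (pvVal hm q.1 q.2 != 9) && !(PySem.Set.contains acc.1 q) && decide (pvVal hm p.1 p.2 < pvVal hm q.1 q.2) then
          (PySem.Set.add acc.1 q, q :: acc.2)
        else acc) (vis, st)) = (vis ++ L, L.reverse ++ st) ∧
      (∀ q ∈ L, pvStep hm w h p q) ∧ PvInv hm w h s (vis ++ L) ∧
      (∀ q ∈ ns, pvStep hm w h p q → q ∈ vis ++ L) := by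
  intro ns
  induction ns with
  | nil => intro _ vis st hV; exact ⟨[], by simp, by simp, by simpa using hV, by simp⟩
  | cons q ns ih =>
    intro hns vis st hV
    simp only [List.foldl_cons]
    by_cases hg : ((pvVal hm q.1 q.2 != 9) && !(PySem.Set.contains vis q) && decide (pvVal hm p.1 p.2 < pvVal hm q.1 q.2)) = true
    · simp only [hg, if_true]
      simp only [Bool.and_eq_true, bne_iff_ne, Bool.not_eq_true',
        PySem.Set.contains_eq_listContains, decide_eq_true_eq] at hg
      obtain ⟨⟨hne9, hnm⟩, hlt⟩ := hg
      rw [List.contains_eq_mem, decide_eq_false_iff_not] at hnm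
      have hstep : pvStep hm w h p q := ⟨hns q (by simp), hne9, hlt⟩
      have hadd : PySem.Set.add vis q = vis ++ [q] := set_add_not_mem _ _ hnm
      rw [hadd]
      have hV1 : PvInv hm w h s (vis ++ [q]) := by
        refine ⟨hV.nodup.append (List.nodup_singleton _) ?_, ?_, ?_⟩
        · intro a ha hb; simp only [List.mem_singleton] at hb; subst hb; exact hnm ha
        · intro r hr
          rcases List.mem_append.mp hr with hr | hr
          · exact hV.reach r hr
          · simp only [List.mem_singleton] at hr; subst hr; exact hpR.tail hstep
        · intro r hr
          rcases List.mem_append.mp hr with hr | hr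
          · exact hV.inb r hr
          · simp only [List.mem_singleton] at hr; subst hr; exact pvNbrs_inb hpin hstep.1
      obtain ⟨L, hfold, hLstep, hLinv, hLmem⟩ := ih (fun r hr => hns r (by simp [hr])) (vis ++ [q]) (q :: st) hV1
      refine ⟨q :: L, ?_, ?_, ?_, ?_⟩
      · rw [hfold]; simp
      · intro r hr
        rcases List.mem_cons.mp hr with hr | hr
        · subst hr; exact hstep
        · exact hLstep r hr
      · simpa using hLinv
      · intro r hr hrs
        rcases List.mem_cons.mp hr with hr | hr
        · subst hr; simp
        · have := hLmem r hr hrs; simpa using this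
    · simp only [hg, if_false]
      obtain ⟨L, hfold, hLstep, hLinv, hLmem⟩ := ih (fun r hr => hns r (by simp [hr])) vis st hV
      refine ⟨L, hfold, hLstep, hLinv, ?_⟩
      intro r hr hrs
      rcases List.mem_cons.mp hr with hr | hr
      · subst hr
        rw [Bool.not_eq_true] at hg
        by_contra hnm
        have hnm' : r ∉ vis := fun hmem => hnm (List.mem_append_left _ hmem)
        simp [PySem.Set.contains_eq_listContains, List.contains_eq_mem,
          hrs.2.1, hrs.2.2, hnm'] at hg
      · exact hLmem r hr hrs

lemma flood_post (hm : List (List Int)) (w h : Int) (s : Int × Int) :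
    ∀ (fuel : Nat) (st : List (Int × Int)) (vis : PySem.Set (Int × Int)),
    PvInv hm w h s vis → s ∈ vis → (∀ p ∈ st, p ∈ vis) →
    (∀ p ∈ vis, p ∉ st → ∀ q, pvStep hm w h p q → q ∈ vis) →
    w.toNat * h.toNat + st.length < vis.length + fuel →
    (∃ L, pvFlood hm w h fuel st vis = vis ++ L) ∧
    PvInv hm w h s (pvFlood hm w h fuel st vis) ∧
    s ∈ pvFlood hm w h fuel st vis ∧
    (∀ p ∈ pvFlood hm w h fuel st vis, ∀ q, pvStep hm w h p q → q ∈ pvFlood hm w h fuel st vis) := by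
  intro fuel
  induction fuel with
  | zero =>
    intro st vis hV _ _ _ hfuel
    exfalso
    have := pvLen_le (w := w) (h := h) vis hV.nodup hV.inb
    omega
  | succ fuel IH =>
    intro st vis hV hs hstk hclosed hfuel
    match st with
    | [] =>
      refine ⟨⟨[], by simp [pvFlood]⟩, ?_, ?_, ?_⟩ <;> simp only [pvFlood]
      · exact hV
      · exact hs
      · exact fun p hp q hq => hclosed p hp (by simp) q hq
    | p :: rest =>
      have hpvis : p ∈ vis := hstk p (by simp)
      obtain ⟨L, hfold, hLstep, hLinv, hLmem⟩ :=
        floodFold_post hm w h s p (hV.inb p hpvis) (hV.reach p hpvis)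
          (pvNbrs w h p.1 p.2) (fun q hq => hq) vis rest hV
      have hstep_eq : pvFlood hm w h (fuel+1) (p :: rest) vis =
          pvFlood hm w h fuel (L.reverse ++ rest) (vis ++ L) := by
        simp only [pvFlood]
        rw [hfold]
      rw [hstep_eq]
      have hstk' : ∀ q ∈ L.reverse ++ rest, q ∈ vis ++ L := by
        intro q hq
        rcases List.mem_append.mp hq with hq | hq
        · exact List.mem_append_right _ (List.mem_reverse.mp hq)
        · exact List.mem_append_left _ (hstk q (by simp [hq]))
      have hclosed' : ∀ r ∈ vis ++ L, r ∉ L.reverse ++ rest → ∀ q, pvStep hm w h r q → q ∈ vis ++ L := by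
        intro r hr hnr q hq
        rcases List.mem_append.mp hr with hr | hr
        · by_cases hrp : r = p
          · subst hrp
            exact hLmem q hq.1 hq
          · have hnrest : r ∉ rest := fun hmem => hnr (List.mem_append_right _ hmem)
            have : r ∉ p :: rest := by simp [hrp, hnrest]
            exact List.mem_append_left _ (hclosed r hr this q hq)
        · exact absurd (List.mem_append_left _ (List.mem_reverse.mpr hr)) hnr
      have hfuel' : w.toNat * h.toNat + (L.reverse ++ rest).length < (vis ++ L).length + fuel := by
        simp only [List.length_append, List.length_reverse, List.length_cons] at hfuel ⊢
        omega
      obtain ⟨⟨L2, hL2⟩, hinv2, hs2, hcl2⟩ :=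
        IH (L.reverse ++ rest) (vis ++ L) hLinv (List.mem_append_left _ hs) hstk' hclosed' hfuel'
      exact ⟨⟨L ++ L2, by rw [hL2, List.append_assoc]⟩, hinv2, hs2, hcl2⟩

lemma flood_top (hm : List (List Int)) (w h x y : Int) (hin : pvInb w h (x, y)) :
    (pvFlood hm w h ((w * h).toNat + 1) [(x, y)] (PySem.Set.ofList [(x, y)])).Nodup ∧
    (∀ p, p ∈ pvFlood hm w h ((w * h).toNat + 1) [(x, y)] (PySem.Set.ofList [(x, y)]) ↔
      pvReach hm w h (x, y) p) := by
  have hN : w.toNat * h.toNat = (w * h).toNat := by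
    obtain ⟨hxl, hxw, hyl, hyh⟩ := hin
    dsimp only at hxl hxw hyl hyh
    rw [Int.toNat_mul (by omega) (by omega)]
  have hof : PySem.Set.ofList [(x, y)] = [(x, y)] := rfl
  rw [hof]
  have hpost := flood_post hm w h (x, y) ((w * h).toNat + 1) [(x, y)] [(x, y)]
    ⟨List.nodup_singleton _, by simp; exact .base, by simpa using hin⟩
    (by simp) (by simp) (by simp) (by simp [hN])
  obtain ⟨⟨L, hL⟩, hinv, hs, hcl⟩ := hpost
  refine ⟨hinv.nodup, fun p => ⟨fun hp => hinv.reach p hp, fun hp => ?_⟩⟩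
  induction hp with
  | base => exact hs
  | tail hr hstep ih => exact hcl _ ih _ hstep

-- the two basin sizes agree at every in-bounds cell
lemma size_eq (hm : List (List Int)) (w h x y : Int) (hin : pvInb w h (x, y)) :
    (pvBfsA hm w h ((w * h).toNat + 1) x y PySem.Set.empty).1 =
    ((pvFlood hm w h ((w * h).toNat + 1) [(x, y)] (PySem.Set.ofList [(x, y)])).length : Int) := by
  obtain ⟨hc, hndA, hmemA⟩ := bfsA_top hm w h x y hin
  obtain ⟨hndB, hmemB⟩ := flood_top hm w h x y hin
  have hperm := (List.perm_ext_iff_of_nodup hndA hndB).mpr (fun p => by rw [hmemA, hmemB])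
  rw [hc, hperm.length_eq]

-- the two low-point tests agree at every in-bounds cell
set_option maxHeartbeats 1000000 in
lemma isLow_eq (hm : List (List Int)) (w h x y : Int) (hin : pvInb w h (x, y)) :
    pvIsLowA hm w h x y = pvIsLowB hm w h x y := by
  obtain ⟨hxl, hxw, hyl, hyh⟩ := hin
  dsimp only at hxl hxw hyl hyh
  rw [Bool.eq_iff_iff]
  simp only [pvIsLowA, pvIsLowB, pvNbrs, List.all_append]
  split_ifs <;> simp_all <;> omega

lemma flatMap_singleton_eq_map {α β : Type} (l : List α) (f : α → β) :
    (l.flatMap fun x => [f x]) = l.map f := by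
  induction l with
  | nil => rfl
  | cons a t ih => simp [List.flatMap_cons, ih]

-- both programs produce the same list of basin sizes
lemma sums_eq (hm : List (List Int)) (w h : Int) :
    ((PySem.List.pyRange 0 w 1).foldl (fun acc x =>
        (PySem.List.pyRange 0 h 1).foldl (fun acc y =>
          if pvIsLowA hm w h x y then acc ++ [(x, y)] else acc) acc) []).foldl
      (fun acc p =>
        acc ++ [(pvBfsA hm w h ((w * h).toNat + 1) p.1 p.2 PySem.Set.empty).1]) [] =
    (PySem.List.pyRange 0 w 1).foldl (fun acc x =>
        (PySem.List.pyRange 0 h 1).foldl (fun acc y =>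
          if pvIsLowB hm w h x y then
            acc ++ [((pvFlood hm w h ((w * h).toNat + 1) [(x, y)] (PySem.Set.ofList [(x, y)])).length : Int)]
          else acc) acc) [] := by
  have houterA : ((PySem.List.pyRange 0 w 1).foldl (fun acc x =>
        (PySem.List.pyRange 0 h 1).foldl (fun acc y =>
          if pvIsLowA hm w h x y then acc ++ [(x, y)] else acc) acc) []) =
      (PySem.List.pyRange 0 w 1).foldl (fun acc x =>
        acc ++ ((PySem.List.pyRange 0 h 1).filter (fun y => pvIsLowA hm w h x y)).map
          (fun y => (x, y))) [] :=
    PySem.List.foldl_congr_mem _ _ _ _ (fun acc x _ => PySem.List.foldl_append_if _ _ _ _)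
  have houterB : ((PySem.List.pyRange 0 w 1).foldl (fun acc x =>
        (PySem.List.pyRange 0 h 1).foldl (fun acc y =>
          if pvIsLowB hm w h x y then
            acc ++ [((pvFlood hm w h ((w * h).toNat + 1) [(x, y)] (PySem.Set.ofList [(x, y)])).length : Int)]
          else acc) acc) []) =
      (PySem.List.pyRange 0 w 1).foldl (fun acc x =>
        acc ++ ((PySem.List.pyRange 0 h 1).filter (fun y => pvIsLowB hm w h x y)).map
          (fun y => ((pvFlood hm w h ((w * h).toNat + 1) [(x, y)] (PySem.Set.ofList [(x, y)])).length : Int))) [] :=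
    PySem.List.foldl_congr_mem _ _ _ _ (fun acc x _ => PySem.List.foldl_append_if _ _ _ _)
  rw [houterA, houterB]
  rw [PySem.List.foldl_append_eq_flatMap, PySem.List.foldl_append_eq_flatMap,
    PySem.List.foldl_append_eq_flatMap]
  simp only [List.nil_append, flatMap_singleton_eq_map, List.map_flatMap]
  apply List.flatMap_congr
  intro x hx
  rw [PySem.List.mem_pyRange_one] at hx
  rw [List.map_map]
  rw [List.filter_congr (fun y hy => isLow_eq hm w h x y
    ⟨hx.1, hx.2, (PySem.List.mem_pyRange_one.mp hy).1, (PySem.List.mem_pyRange_one.mp hy).2⟩)]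
  apply List.map_congr_left
  intro y hy
  have hy' := (List.mem_filter.mp hy).1
  rw [PySem.List.mem_pyRange_one] at hy'
  have hin : pvInb w h (x, y) := ⟨hx.1, hx.2, hy'.1, hy'.2⟩
  simpa using size_eq hm w h x y hin

theorem part2_equal (s ex : String) : part2 s ex = part2_alt s ex := by
  unfold part2 part2_alt
  dsimp only
  rw [sums_eq]

-- ===== VERDICT (by name: the statement is the Claim_ definition above) =====
theorem part2_spec : Claim_equal_part2 := by
  intro s ex _ _
  unfold Spec_part2
  exact part2_equal s ex
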